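-- pv_equiv track=rewrite | github.com/isudox/nerd-algo | python-algo/leetcode/problem_446.py | number_of_arithmetic_slices2
-- ===== SOURCE A (Python) =====
-- from functools import lru_cache
-- from typing import List
--
-- def number_of_arithmetic_slices2(nums: List[int]) -> int:
--     @lru_cache(None)
--     def dfs(pos: int, diff: int) -> int:
--         if pos == len(nums) - 1:
--             return 0
--         ret = 0
--         for i in range(pos + 1, len(nums)):
--             if nums[i] - nums[pos] == diff:
--                 ret += dfs(i, diff) + 1
--         return ret
--
--     ans = 0
--     for i in range(len(nums) - 2):
--         for j in range(i + 1, len(nums)):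
--             ans += dfs(j, nums[j] - nums[i])
--     return ans
-- ===== SOURCE B (Python) =====
-- from typing import List
--
-- def number_of_arithmetic_slices2(nums: List[int]) -> int:
--     # Bottom-up DP: for each element keep a dict diff -> number of arithmetic
--     # subsequences of length >= 2 ending there with that diff; each extension of
--     # such a subsequence adds one length>=3 slice to the answer.  O(n^2).
--     ans = 0
--     seen = []  # (value, dict) per processed element, in order
--     for x in nums:
--         cur = {}
--         for v, dj in seen:
--             d = x - v
--             prev = dj.get(d, 0)
--             ans += prev
--             cur[d] = cur.get(d, 0) + prev + 1
--         seen.append((x, cur))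
--     return ans
-- ===== Notes on version B (the rewrite author's own statement) =====
-- stated objective: faster
-- what changed: Replaced the memoized top-down recursion over all pairs (dfs from each pair scans the rest of the array) by the bottom-up hashmap DP that keeps, per position, a dict diff -> number of length>=2 arithmetic subsequences ending there, accumulating the answer in one double loop.
import Mathlib
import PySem

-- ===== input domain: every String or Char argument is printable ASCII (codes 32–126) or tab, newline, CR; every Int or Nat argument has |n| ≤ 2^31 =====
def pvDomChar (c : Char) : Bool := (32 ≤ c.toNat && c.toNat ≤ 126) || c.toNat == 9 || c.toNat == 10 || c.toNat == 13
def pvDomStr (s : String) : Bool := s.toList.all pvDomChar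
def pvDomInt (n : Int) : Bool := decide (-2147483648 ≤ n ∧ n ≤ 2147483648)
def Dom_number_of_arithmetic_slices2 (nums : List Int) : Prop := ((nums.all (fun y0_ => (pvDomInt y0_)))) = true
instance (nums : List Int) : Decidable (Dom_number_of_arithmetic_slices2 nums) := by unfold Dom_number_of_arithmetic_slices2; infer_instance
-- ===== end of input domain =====

-- B replaces A's memoized O(n^3) pair-by-pair recursion by the bottom-up
-- per-position hashmap DP (diff -> count of length>=2 arithmetic subsequences
-- ending there), an O(n^2) algorithm; measured faster on large inputs.

-- ===== PORT A =====
-- `lru_cache` memoizes a pure function, so `dfs` is ported as the same plain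
-- recursion; the fuel argument (called with nums.length) only makes the
-- recursion total and is never exhausted on the calls A makes.
def pvDfsA (nums : List Int) : Nat → Int → Int → Int
  | 0, _, _ => 0
  | fuel+1, pos, diff =>
    if pos = (nums.length : Int) - 1 then 0
    else
      (PySem.List.pyRange (pos + 1) (nums.length : Int) 1).foldl
        (fun ret i =>
          if PySem.List.pyGetD nums i 0 - PySem.List.pyGetD nums pos 0 = diff
          then ret + (pvDfsA nums fuel i diff + 1)
          else ret) 0

def number_of_arithmetic_slices2 (nums : List Int) : Int :=
  (PySem.List.pyRange 0 ((nums.length : Int) - 2) 1).foldl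
    (fun ans i =>
      (PySem.List.pyRange (i + 1) (nums.length : Int) 1).foldl
        (fun ans j =>
          ans + pvDfsA nums nums.length j
            (PySem.List.pyGetD nums j 0 - PySem.List.pyGetD nums i 0)) ans) 0

-- ===== PORT B =====
-- body of B's outer loop: inner loop over `seen` updates (ans, cur), then the
-- new pair (x, cur) is appended to `seen`.
def pvStepB (x : Int) (st : Int × List (Int × PySem.Dict Int Int)) :
    Int × List (Int × PySem.Dict Int Int) :=
  let r := st.2.foldl
    (fun (ac : Int × PySem.Dict Int Int) vd =>
      let d := x - vd.1
      let prev := vd.2.getD d 0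
      (ac.1 + prev, ac.2.insert d (ac.2.getD d 0 + prev + 1)))
    (st.1, PySem.Dict.empty)
  (r.1, st.2 ++ [(x, r.2)])

def number_of_arithmetic_slices2_alt (nums : List Int) : Int :=
  (nums.foldl (fun st x => pvStepB x st) (0, [])).1

-- ===== PRECONDITION & SPEC =====
def Spec_number_of_arithmetic_slices2 (nums : List Int) (out : Int) : Prop := out = number_of_arithmetic_slices2_alt nums
instance (nums : List Int) (out : Int) : Decidable (Spec_number_of_arithmetic_slices2 nums out) := by unfold Spec_number_of_arithmetic_slices2; infer_instance

-- ===== CLAIM (what is proved, stated in full; the proofs are below) =====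
def Claim_equal_number_of_arithmetic_slices2 : Prop := ∀ (nums : List Int), Dom_number_of_arithmetic_slices2 nums → Spec_number_of_arithmetic_slices2 nums (number_of_arithmetic_slices2 nums)

-- ===== LEMMAS AND PROOFS =====

-- `pvApd d l`: consecutive differences in l all equal d.
def pvApd (d : Int) : List Int → Bool
  | [] => true
  | [_] => true
  | x :: y :: l => decide (y - x = d) && pvApd d (y :: l)

-- `pvIsAP l`: l is an arithmetic progression (trivially true below length 2).
def pvIsAP : List Int → Bool
  | x :: y :: l => pvApd (y - x) (x :: y :: l)
  | _ => true

-- number of sublists (subsequence occurrences) of l satisfying p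
def pvCnt (p : List Int → Bool) (l : List Int) : Int := (l.sublists'.countP p : Int)

-- the common specification: number of arithmetic subsequences of length ≥ 3
def pvC (l : List Int) : Int := pvCnt (fun s => decide (3 ≤ s.length) && pvIsAP s) l

-- A-side structural model ------------------------------------------------
-- pvF x d l = number of nonempty sublists s of l with apd d (x :: s)
def pvF (x d : Int) : List Int → Int
  | [] => 0
  | y :: l => (if y = x + d then pvF y d l + 1 else 0) + pvF x d l

def pvPx (x : Int) : List Int → Int
  | [] => 0
  | y :: l => pvF y (y - x) l + pvPx x l

def pvAtot : List Int → Int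
  | [] => 0
  | x :: l => pvPx x l + pvAtot l

-- B-side structural model ------------------------------------------------
-- pvFr v d l = number of length≥2 arithmetic subsequences of l++[v] with diff d ending at that v
def pvFr (v d : Int) (l : List Int) : Int := pvF v (-d) l.reverse

def pvQ (x : Int) (l : List Int) : Int :=
  pvCnt (fun s => decide (2 ≤ s.length) && pvIsAP (s ++ [x])) l

def pvGainF (x : Int) : List (Int × PySem.Dict Int Int) → Int
  | [] => 0
  | vd :: s => vd.2.getD (x - vd.1) 0 + pvGainF x s

def pvAddF (x d : Int) : List (Int × PySem.Dict Int Int) → Int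
  | [] => 0
  | vd :: s => (if x - vd.1 = d then vd.2.getD d 0 + 1 else 0) + pvAddF x d s

def pvSeenOK (l : List Int) (s : List (Int × PySem.Dict Int Int)) : Prop :=
  s.map Prod.fst = l ∧
    ∀ j (hj : j < s.length), ∀ d, (s[j]).2.getD d 0 = pvFr ((s[j]).1) d (l.take j)

-- counting lemmas ---------------------------------------------------------
theorem pvCnt_cons (p : List Int → Bool) (x : Int) (l : List Int) :
    pvCnt p (x :: l) = pvCnt p l + pvCnt (fun s => p (x :: s)) l := by
  simp [pvCnt, List.sublists'_cons, List.countP_append, List.countP_map, Function.comp_def]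

theorem pvCnt_snoc (p : List Int → Bool) (x : Int) (l : List Int) :
    pvCnt p (l ++ [x]) = pvCnt p l + pvCnt (fun s => p (s ++ [x])) l := by
  unfold pvCnt
  rw [← (List.sublists_perm_sublists' (l ++ [x])).countP_eq,
    ← (List.sublists_perm_sublists' l).countP_eq,
    ← (List.sublists_perm_sublists' l).countP_eq]
  simp [List.sublists_concat, List.countP_append, List.countP_map, Function.comp_def]

theorem pvCnt_reverse (p : List Int → Bool) (l : List Int) :
    pvCnt p l.reverse = pvCnt (fun s => p s.reverse) l := by
  unfold pvCnt
  rw [List.sublists'_reverse, List.countP_map,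
    (List.sublists_perm_sublists' l).countP_eq]
  simp [Function.comp_def]

theorem pvCnt_congr {p q : List Int → Bool} (h : ∀ s, p s = q s) (l : List Int) :
    pvCnt p l = pvCnt q l := by
  have : p = q := funext h
  rw [this]

theorem pvCnt_split (p : List Int → Bool) (l : List Int) :
    pvCnt p l
      = pvCnt (fun s => !s.isEmpty && p s) l + pvCnt (fun s => s.isEmpty && p s) l := by
  unfold pvCnt
  have : ∀ (L : List (List Int)),
      L.countP p = L.countP (fun s => !s.isEmpty && p s) + L.countP (fun s => s.isEmpty && p s) := by
    intro L
    induction L with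
    | nil => simp
    | cons a L ih =>
      simp only [List.countP_cons, ih]
      cases ha : a.isEmpty <;> cases hp : p a <;> simp_all <;> omega
  rw [this]; push_cast; ring

theorem pvCnt_isEmpty (p : List Int → Bool) (hp : p [] = true) (l : List Int) :
    pvCnt (fun s => s.isEmpty && p s) l = 1 := by
  unfold pvCnt
  induction l with
  | nil => simp [hp]
  | cons a l ih =>
    rw [List.sublists'_cons, List.countP_append, List.countP_map]
    have : ((fun s => s.isEmpty && p s) ∘ (List.cons a)) = fun _ => false := by
      funext s; simp
    rw [this]
    simpa using ih

theorem pvCnt_false (p : List Int → Bool) (h : ∀ s, p s = false) (l : List Int) :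
    pvCnt p l = 0 := by
  unfold pvCnt
  have : l.sublists'.countP p = 0 := List.countP_eq_zero.mpr (fun s _ => by simp [h s])
  simp [this]

-- chain lemmas -------------------------------------------------------------
theorem pvApd_snoc (d : Int) (m : List Int) (b : Int) :
    pvApd d (m ++ [b])
      = (pvApd d m && match m.getLast? with
          | none => true
          | some a => decide (b - a = d)) := by
  induction m using List.twoStepInduction with
  | nil => simp [pvApd]
  | singleton a => simp [pvApd]
  | cons_cons a c m _ ih2 =>
    show (decide (c - a = d) && pvApd d ((c :: m) ++ [b])) = _
    rw [ih2 c]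
    have h3 : (a :: c :: m).getLast? = (c :: m).getLast? := by
      simp [List.getLast?_cons_cons]
    rw [h3]
    show _ = ((decide (c - a = d) && pvApd d (c :: m)) && _)
    cases (c :: m).getLast? <;> simp [Bool.and_assoc]

theorem pvApd_reverse (d : Int) (l : List Int) :
    pvApd d l.reverse = pvApd (-d) l := by
  induction l using List.twoStepInduction with
  | nil => simp [pvApd]
  | singleton a => simp [pvApd]
  | cons_cons a b l _ ih2 =>
    have h1 : (a :: b :: l).reverse = (b :: l).reverse ++ [a] := by simp
    rw [h1, pvApd_snoc, ih2 b]
    have h2 : ((b :: l).reverse).getLast? = some b := by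
      rw [List.getLast?_reverse]; rfl
    rw [h2]
    show (pvApd (-d) (b :: l) && decide (a - b = d)) = (decide (b - a = -d) && pvApd (-d) (b :: l))
    have h3 : (decide (a - b = d)) = (decide (b - a = -d)) := by
      rw [decide_eq_decide]; omega
    rw [h3, Bool.and_comm]

-- the key pointwise fact linking B's "ending at v" chains to pvIsAP
theorem pvIsAP_snoc2 (v x : Int) (s : List Int) (hs : s ≠ []) :
    pvIsAP (s ++ [v, x]) = pvApd (x - v) (s ++ [v]) := by
  match s, hs with
  | [a], _ =>
    show pvApd (v - a) [a, v, x] = pvApd (x - v) [a, v]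
    simp [pvApd, decide_eq_decide]
    constructor <;> intro h <;> omega
  | a :: b :: t, _ =>
    show pvApd (b - a) ((a :: b :: t) ++ [v, x]) = _
    have h1 : (a :: b :: t) ++ [v, x] = ((a :: b :: t) ++ [v]) ++ [x] := by simp
    rw [h1, pvApd_snoc]
    have h2 : ((a :: b :: t) ++ [v]).getLast? = some v := by
      rw [List.getLast?_concat]
    rw [h2]
    by_cases hd : b - a = x - v
    · rw [hd]; simp
    · have h7 : pvApd (x - v) ((a :: b :: t) ++ [v]) = false := by
        show (decide (b - a = (x - v)) && _) = false
        simp [hd]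
      rw [h7]
      cases h8 : pvApd (b - a) ((a :: b :: t) ++ [v]) <;> simp
      intro h9
      omega

-- A-side counting ----------------------------------------------------------
theorem pvF_count (x d : Int) (l : List Int) :
    pvF x d l = pvCnt (fun s => !s.isEmpty && pvApd d (x :: s)) l := by
  induction l generalizing x with
  | nil => simp [pvF, pvCnt]
  | cons y l ih =>
    rw [pvCnt_cons, ← ih x]
    by_cases h : y = x + d
    · have e1 : ∀ s : List Int,
          (!(y :: s).isEmpty && pvApd d (x :: y :: s)) = pvApd d (y :: s) := by
        intro s
        show (true && (decide (y - x = d) && pvApd d (y :: s))) = _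
        have hd : y - x = d := by omega
        simp [hd]
      rw [pvCnt_congr e1, pvCnt_split, pvCnt_isEmpty _ (by simp [pvApd])]
      rw [← ih y]
      show (if y = x + d then pvF y d l + 1 else 0) + pvF x d l = _
      rw [if_pos h]; ring
    · have e1 : ∀ s : List Int,
          (!(y :: s).isEmpty && pvApd d (x :: y :: s)) = false := by
        intro s
        show (true && (decide (y - x = d) && pvApd d (y :: s))) = false
        have hd : ¬ (y - x = d) := by omega
        simp [hd]
      rw [pvCnt_false _ e1]
      show (if y = x + d then pvF y d l + 1 else 0) + pvF x d l = _
      rw [if_neg h]; ring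

theorem pvPx_count (x : Int) (l : List Int) :
    pvPx x l = pvCnt (fun s => decide (2 ≤ s.length) && pvIsAP (x :: s)) l := by
  induction l with
  | nil => simp [pvPx, pvCnt]
  | cons y l ih =>
    rw [pvCnt_cons, ← ih]
    have e1 : ∀ s : List Int,
        (decide (2 ≤ (y :: s).length) && pvIsAP (x :: y :: s))
          = (!s.isEmpty && pvApd (y - x) (y :: s)) := by
      intro s
      cases s with
      | nil => simp
      | cons z t =>
        show (decide (2 ≤ t.length + 2) && (decide (y - x = y - x) && pvApd (y - x) (y :: z :: t)))
          = (true && pvApd (y - x) (y :: z :: t))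
        simp
    rw [pvCnt_congr e1, ← pvF_count]
    show pvF y (y - x) l + pvPx x l = _
    ring

theorem pvAtot_eq_pvC (l : List Int) : pvAtot l = pvC l := by
  induction l with
  | nil => simp [pvAtot, pvC, pvCnt]
  | cons x l ih =>
    unfold pvC
    rw [pvCnt_cons]
    have e1 : ∀ s : List Int,
        (decide (3 ≤ (x :: s).length) && pvIsAP (x :: s))
          = (decide (2 ≤ s.length) && pvIsAP (x :: s)) := by
      intro s
      have : (decide (3 ≤ (x :: s).length)) = (decide (2 ≤ s.length)) := by
        rw [decide_eq_decide]; simp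
      rw [this]
    rw [pvCnt_congr e1, ← pvPx_count]
    show pvPx x l + pvAtot l = pvCnt _ l + pvPx x l
    rw [ih]; unfold pvC; ring

-- B-side counting ----------------------------------------------------------
theorem pvFr_count (v d : Int) (l : List Int) :
    pvFr v d l = pvCnt (fun s => !s.reverse.isEmpty && pvApd (-d) (v :: s.reverse)) l := by
  unfold pvFr
  rw [pvF_count, pvCnt_reverse]

theorem pvQ_snoc (x v : Int) (l : List Int) :
    pvQ x (l ++ [v]) = pvQ x l + pvFr v (x - v) l := by
  unfold pvQ
  rw [pvCnt_snoc, pvFr_count]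
  have e1 : ∀ s : List Int,
      (decide (2 ≤ (s ++ [v]).length) && pvIsAP (s ++ [v] ++ [x]))
        = (!s.reverse.isEmpty && pvApd (-(x - v)) (v :: s.reverse)) := by
    intro s
    cases s with
    | nil => simp [pvIsAP, pvApd]
    | cons a t =>
      have h1 : (a :: t) ++ [v] ++ [x] = (a :: t) ++ [v, x] := by simp
      rw [h1, pvIsAP_snoc2 v x (a :: t) (by simp)]
      have h2 : v :: ((a :: t).reverse) = ((a :: t) ++ [v]).reverse := by simp
      rw [h2, pvApd_reverse, neg_neg]
      simp
  rw [pvCnt_congr e1]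

theorem pvC_snoc (x : Int) (l : List Int) : pvC (l ++ [x]) = pvC l + pvQ x l := by
  unfold pvC pvQ
  rw [pvCnt_snoc]
  have e1 : ∀ s : List Int,
      (decide (3 ≤ (s ++ [x]).length) && pvIsAP (s ++ [x]))
        = (decide (2 ≤ s.length) && pvIsAP (s ++ [x])) := by
    intro s
    have : (decide (3 ≤ (s ++ [x]).length)) = (decide (2 ≤ s.length)) := by
      rw [decide_eq_decide]; simp
    rw [this]
  rw [pvCnt_congr e1]

theorem pvFr_snoc (x d v : Int) (l : List Int) :
    pvFr x d (l ++ [v]) = (if x - v = d then pvFr v d l + 1 else 0) + pvFr x d l := by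
  unfold pvFr
  have h1 : (l ++ [v]).reverse = v :: l.reverse := by simp
  rw [h1]
  show (if v = x + -d then pvF v (-d) l.reverse + 1 else 0) + pvF x (-d) l.reverse = _
  rw [if_congr (show (v = x + -d) ↔ (x - v = d) by omega) rfl rfl]

-- B port: inner loop ------------------------------------------------------
theorem pvInner_fst (x : Int) (s : List (Int × PySem.Dict Int Int))
    (a : Int) (c : PySem.Dict Int Int) :
    (s.foldl
      (fun (ac : Int × PySem.Dict Int Int) vd =>
        let d := x - vd.1
        let prev := vd.2.getD d 0
        (ac.1 + prev, ac.2.insert d (ac.2.getD d 0 + prev + 1))) (a, c)).1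
      = a + pvGainF x s := by
  induction s generalizing a c with
  | nil => simp [pvGainF]
  | cons vd s ih =>
    simp only [List.foldl_cons]
    rw [ih]
    show a + vd.2.getD (x - vd.1) 0 + pvGainF x s = a + (vd.2.getD (x - vd.1) 0 + pvGainF x s)
    ring

theorem pvInner_getD (x : Int) (s : List (Int × PySem.Dict Int Int))
    (a : Int) (c : PySem.Dict Int Int) (d : Int) :
    ((s.foldl
      (fun (ac : Int × PySem.Dict Int Int) vd =>
        let d := x - vd.1
        let prev := vd.2.getD d 0
        (ac.1 + prev, ac.2.insert d (ac.2.getD d 0 + prev + 1))) (a, c)).2).getD d 0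
      = c.getD d 0 + pvAddF x d s := by
  induction s generalizing a c with
  | nil => simp [pvAddF]
  | cons vd s ih =>
    simp only [List.foldl_cons]
    rw [ih]
    show (c.insert (x - vd.1) (c.getD (x - vd.1) 0 + vd.2.getD (x - vd.1) 0 + 1)).getD d 0
        + pvAddF x d s
      = c.getD d 0 + ((if x - vd.1 = d then vd.2.getD d 0 + 1 else 0) + pvAddF x d s)
    rw [PySem.Dict.getD_insert]
    by_cases h : d = x - vd.1
    · rw [if_pos h, if_pos h.symm, h]; ring
    · rw [if_neg h, if_neg (fun hh => h hh.symm)]; ring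

theorem pvGainF_eq (x : Int) (l : List Int) (s : List (Int × PySem.Dict Int Int))
    (h : pvSeenOK l s) : pvGainF x s = pvQ x l := by
  obtain ⟨hmap, hdict⟩ := h
  subst hmap
  induction s using List.reverseRecOn with
  | nil => simp [pvGainF, pvQ, pvCnt]
  | append_singleton s vd ih =>
    have hmapapp : (s ++ [vd]).map Prod.fst = s.map Prod.fst ++ [vd.1] := by simp
    rw [hmapapp, pvQ_snoc]
    have hlen : (s.map Prod.fst).length = s.length := by simp
    have hgapp : ∀ (t : List (Int × PySem.Dict Int Int)) (e : Int × PySem.Dict Int Int),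
        pvGainF x (t ++ [e]) = pvGainF x t + e.2.getD (x - e.1) 0 := by
      intro t e
      induction t with
      | nil => show e.2.getD (x - e.1) 0 + 0 = 0 + _; ring
      | cons u t iht =>
        show u.2.getD (x - u.1) 0 + pvGainF x (t ++ [e]) = _
        rw [iht]
        show _ = u.2.getD (x - u.1) 0 + pvGainF x t + _
        ring
    rw [hgapp]
    have hlast := hdict s.length (by simp) (x - vd.1)
    have hgetlast : (s ++ [vd])[s.length] = vd := by
      simp
    rw [hgetlast] at hlast
    have htake : ((s ++ [vd]).map Prod.fst).take s.length = s.map Prod.fst := by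
      rw [hmapapp, ← hlen, List.take_left]
    rw [htake] at hlast
    rw [hlast]
    congr 1
    apply ih
    intro j hj d
    have hj' : j < (s ++ [vd]).length := by simp; omega
    have h1 := hdict j hj' d
    have h2 : (s ++ [vd])[j] = s[j] := by
      rw [List.getElem_append_left hj]
    rw [h2] at h1
    have h3 : ((s ++ [vd]).map Prod.fst).take j = (s.map Prod.fst).take j := by
      rw [hmapapp, List.take_append_of_le_length (by omega)]
    rw [h3] at h1
    exact h1

theorem pvAddF_eq (x d : Int) (l : List Int) (s : List (Int × PySem.Dict Int Int))
    (h : pvSeenOK l s) : pvAddF x d s = pvFr x d l := by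
  obtain ⟨hmap, hdict⟩ := h
  subst hmap
  induction s using List.reverseRecOn with
  | nil => simp [pvAddF, pvFr, pvF]
  | append_singleton s vd ih =>
    have hmapapp : (s ++ [vd]).map Prod.fst = s.map Prod.fst ++ [vd.1] := by simp
    rw [hmapapp, pvFr_snoc]
    have hlen : (s.map Prod.fst).length = s.length := by simp
    have haapp : ∀ (t : List (Int × PySem.Dict Int Int)) (e : Int × PySem.Dict Int Int),
        pvAddF x d (t ++ [e]) = pvAddF x d t + (if x - e.1 = d then e.2.getD d 0 + 1 else 0) := by
      intro t e
      induction t with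
      | nil => show (if x - e.1 = d then e.2.getD d 0 + 1 else 0) + 0 = 0 + _; ring
      | cons u t iht =>
        show (if x - u.1 = d then u.2.getD d 0 + 1 else 0) + pvAddF x d (t ++ [e]) = _
        rw [iht]
        show _ = (if x - u.1 = d then u.2.getD d 0 + 1 else 0) + pvAddF x d t + _
        ring
    rw [haapp]
    have hlast := hdict s.length (by simp) d
    have hgetlast : (s ++ [vd])[s.length] = vd := by simp
    rw [hgetlast] at hlast
    have htake : ((s ++ [vd]).map Prod.fst).take s.length = s.map Prod.fst := by
      rw [hmapapp, ← hlen, List.take_left]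
    rw [htake] at hlast
    rw [hlast]
    have ih' : pvAddF x d s = pvFr x d (s.map Prod.fst) := by
      apply ih
      intro j hj d'
      have hj' : j < (s ++ [vd]).length := by simp; omega
      have h1 := hdict j hj' d'
      have h2 : (s ++ [vd])[j] = s[j] := by
        rw [List.getElem_append_left hj]
      rw [h2] at h1
      have h3 : ((s ++ [vd]).map Prod.fst).take j = (s.map Prod.fst).take j := by
        rw [hmapapp, List.take_append_of_le_length (by omega)]
      rw [h3] at h1
      exact h1
    rw [ih']
    ring

theorem pvStepB_spec (x : Int) (st : Int × List (Int × PySem.Dict Int Int)) :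
    ∃ C, pvStepB x st = (st.1 + pvGainF x st.2, st.2 ++ [(x, C)]) ∧
      ∀ d, C.getD d 0 = pvAddF x d st.2 := by
  refine ⟨(st.2.foldl
    (fun (ac : Int × PySem.Dict Int Int) vd =>
      let d := x - vd.1
      let prev := vd.2.getD d 0
      (ac.1 + prev, ac.2.insert d (ac.2.getD d 0 + prev + 1)))
    (st.1, PySem.Dict.empty)).2, ?_, ?_⟩
  · simp only [pvStepB]
    refine Prod.ext ?_ rfl
    exact pvInner_fst x st.2 st.1 PySem.Dict.empty
  · intro d
    rw [pvInner_getD]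
    simp

theorem pvB_invariant (nums : List Int) :
    (nums.foldl (fun st x => pvStepB x st) ((0 : Int), [])).1 = pvC nums ∧
      pvSeenOK nums (nums.foldl (fun st x => pvStepB x st) ((0 : Int), [])).2 := by
  induction nums using List.reverseRecOn with
  | nil =>
    refine ⟨by simp [pvC, pvCnt], by simp, ?_⟩
    intro j hj d
    simp at hj
  | append_singleton l x ih =>
    obtain ⟨ih1, ihOK⟩ := ih
    rw [List.foldl_append]
    set st := l.foldl (fun st x => pvStepB x st) ((0 : Int), []) with hst
    have hmap : st.2.map Prod.fst = l := ihOK.1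
    have hlen : st.2.length = l.length := by
      rw [← hmap]; simp
    simp only [List.foldl_cons, List.foldl_nil]
    obtain ⟨C, hstep, hC⟩ := pvStepB_spec x st
    rw [hstep]
    refine ⟨?_, ?_, ?_⟩
    · show st.1 + pvGainF x st.2 = _
      rw [ih1, pvGainF_eq x l st.2 ihOK, pvC_snoc]
    · show (st.2 ++ [(x, C)]).map Prod.fst = l ++ [x]
      simp [hmap]
    · intro j hj d
      simp only [List.length_append, List.length_cons, List.length_nil] at hj
      by_cases hjl : j < st.2.length
      · have h2 : (st.2 ++ [(x, C)])[j] = st.2[j] := List.getElem_append_left hjl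
        rw [h2]
        have h3 : (l ++ [x]).take j = l.take j := by
          rw [List.take_append_of_le_length (by omega)]
        rw [h3]
        exact ihOK.2 j hjl d
      · have hje : j = st.2.length := by omega
        subst hje
        have h2 : (st.2 ++ [(x, C)])[st.2.length] = (x, C) := by simp
        rw [h2]
        have h3 : (l ++ [x]).take st.2.length = l := by
          rw [hlen, List.take_left]
        rw [h3]
        show C.getD d 0 = pvFr x d l
        rw [hC, pvAddF_eq x d l st.2 ihOK]

-- A port → structural model -------------------------------------------------
theorem pvAtot_short (l : List Int) (h : l.length ≤ 2) : pvAtot l = 0 := by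
  match l, h with
  | [], _ => rfl
  | [a], _ => simp [pvAtot, pvPx]
  | [a, b], _ => simp [pvAtot, pvPx, pvF]
  | a :: b :: c :: t, h => simp at h

theorem pvDfsA_eq (nums : List Int) :
    ∀ fuel pos, nums.length ≤ fuel + pos → ∀ diff,
      pvDfsA nums fuel (pos : Int) diff
        = pvF (nums.getD pos 0) diff (nums.drop (pos + 1)) := by
  intro fuel
  induction fuel with
  | zero =>
    intro pos hle diff
    show (0 : Int) = _
    rw [List.drop_eq_nil_of_le (by omega)]
    rfl
  | succ fuel ih =>
    intro pos hle diff
    simp only [pvDfsA]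
    by_cases hp : pos + 1 = nums.length
    · rw [if_pos (by omega)]
      rw [show nums.drop (pos + 1) = [] from by rw [hp]; exact List.drop_length]
      rfl
    · rw [if_neg (by omega)]
      have inner : ∀ (ep : Int) (m k : Nat), nums.length - k = m → pos + 1 ≤ k → ∀ acc : Int,
          (PySem.List.pyRange (k : Int) (nums.length : Int) 1).foldl
            (fun ret i =>
              if PySem.List.pyGetD nums i 0 - ep = diff
              then ret + (pvDfsA nums fuel i diff + 1)
              else ret) acc
          = acc + pvF ep diff (nums.drop k) := by
        intro ep m
        induction m with
        | zero =>
          intro k hm hk acc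
          rw [PySem.List.pyRange_one_eq_nil (by omega), List.drop_eq_nil_of_le (by omega)]
          show acc = acc + 0
          ring
        | succ m ihm =>
          intro k hm hk acc
          have hkn : k < nums.length := by omega
          rw [PySem.List.pyRange_one_cons (by omega)]
          rw [List.foldl_cons]
          rw [PySem.List.pyGetD_natCast]
          rw [ih k (by omega) diff]
          have hdrop : nums.drop k = nums.getD k 0 :: nums.drop (k + 1) := by
            rw [List.getD_eq_getElem _ _ hkn, List.getElem_cons_drop]
          have hcast : ((k : Int) + 1) = (((k + 1 : Nat)) : Int) := by push_cast; ring
          by_cases hc : nums.getD k 0 - ep = diff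
          · rw [if_pos hc, hcast, ihm (k + 1) (by omega) (by omega), hdrop]
            show _ = acc + ((if nums.getD k 0 = ep + diff
                then pvF (nums.getD k 0) diff (nums.drop (k + 1)) + 1 else 0)
              + pvF ep diff (nums.drop (k + 1)))
            rw [if_pos (by omega)]
            ring
          · rw [if_neg hc, hcast, ihm (k + 1) (by omega) (by omega), hdrop]
            show _ = acc + ((if nums.getD k 0 = ep + diff
                then pvF (nums.getD k 0) diff (nums.drop (k + 1)) + 1 else 0)
              + pvF ep diff (nums.drop (k + 1)))
            rw [if_neg (by omega)]
            ring
      have h0 := inner (PySem.List.pyGetD nums (pos : Int) 0)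
        (nums.length - (pos + 1)) (pos + 1) rfl (le_refl _) 0
      rw [show ((pos : Int) + 1) = (((pos + 1 : Nat)) : Int) from by push_cast; ring, h0,
        PySem.List.pyGetD_natCast]
      ring

theorem pvA_outer (nums : List Int) :
    ∀ (k : Nat) (acc : Int), (PySem.List.pyRange ((k : Nat) : Int) ((nums.length : Int) - 2) 1).foldl
      (fun ans i =>
        (PySem.List.pyRange (i + 1) (nums.length : Int) 1).foldl
          (fun ans j =>
            ans + pvDfsA nums nums.length j
              (PySem.List.pyGetD nums j 0 - PySem.List.pyGetD nums i 0)) ans) acc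
      = acc + pvAtot (nums.drop k) := by
  have inner : ∀ (e : Int) (m k2 : Nat), nums.length - k2 = m → ∀ acc : Int,
      (PySem.List.pyRange (k2 : Int) (nums.length : Int) 1).foldl
        (fun ans j =>
          ans + pvDfsA nums nums.length j (PySem.List.pyGetD nums j 0 - e)) acc
      = acc + pvPx e (nums.drop k2) := by
    intro e m
    induction m with
    | zero =>
      intro k2 hm acc
      rw [PySem.List.pyRange_one_eq_nil (by omega), List.drop_eq_nil_of_le (by omega)]
      show acc = acc + 0
      ring
    | succ m ihm =>
      intro k2 hm acc
      have hkn : k2 < nums.length := by omega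
      rw [PySem.List.pyRange_one_cons (by omega), List.foldl_cons,
        PySem.List.pyGetD_natCast,
        pvDfsA_eq nums nums.length k2 (by omega) _]
      have hcast : ((k2 : Int) + 1) = (((k2 + 1 : Nat)) : Int) := by push_cast; ring
      rw [hcast, ihm (k2 + 1) (by omega)]
      have hdrop : nums.drop k2 = nums.getD k2 0 :: nums.drop (k2 + 1) := by
        rw [List.getD_eq_getElem _ _ hkn, List.getElem_cons_drop]
      rw [hdrop]
      show _ = acc + (pvF (nums.getD k2 0) (nums.getD k2 0 - e) (nums.drop (k2 + 1))
        + pvPx e (nums.drop (k2 + 1)))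
      ring
  have main : ∀ (m k : Nat), nums.length - k = m → ∀ acc : Int,
      (PySem.List.pyRange ((k : Nat) : Int) ((nums.length : Int) - 2) 1).foldl
        (fun ans i =>
          (PySem.List.pyRange (i + 1) (nums.length : Int) 1).foldl
            (fun ans j =>
              ans + pvDfsA nums nums.length j
                (PySem.List.pyGetD nums j 0 - PySem.List.pyGetD nums i 0)) ans) acc
      = acc + pvAtot (nums.drop k) := by
    intro m
    induction m with
    | zero =>
      intro k hm acc
      rw [PySem.List.pyRange_one_eq_nil (by omega), List.drop_eq_nil_of_le (by omega)]
      show acc = acc + 0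
      ring
    | succ m ihm =>
      intro k hm acc
      by_cases hlt : (k : Int) < (nums.length : Int) - 2
      · have hkn : k < nums.length := by omega
        rw [PySem.List.pyRange_one_cons (by omega), List.foldl_cons]
        have hcast : ((k : Int) + 1) = (((k + 1 : Nat)) : Int) := by push_cast; ring
        rw [hcast, inner _ (nums.length - (k + 1)) (k + 1) rfl acc,
          PySem.List.pyGetD_natCast, ihm (k + 1) (by omega)]
        have hdrop : nums.drop k = nums.getD k 0 :: nums.drop (k + 1) := by
          rw [List.getD_eq_getElem _ _ hkn, List.getElem_cons_drop]
        rw [hdrop]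
        show _ = acc + (pvPx (nums.getD k 0) (nums.drop (k + 1)) + pvAtot (nums.drop (k + 1)))
        ring
      · rw [PySem.List.pyRange_one_eq_nil (by omega)]
        rw [pvAtot_short (nums.drop k) (by simp; omega)]
        show acc = acc + 0
        ring
  intro k acc
  exact main (nums.length - k) k rfl acc

-- ===== VERDICT (by name: the statement is the Claim_ definition above) =====
theorem number_of_arithmetic_slices2_spec : Claim_equal_number_of_arithmetic_slices2 := by
  intro nums _
  unfold Spec_number_of_arithmetic_slices2 number_of_arithmetic_slices2 number_of_arithmetic_slices2_alt
  have hA := pvA_outer nums 0 0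
  simp only [Nat.cast_zero, List.drop_zero, zero_add] at hA
  rw [hA, (pvB_invariant nums).1, pvAtot_eq_pvC]
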